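-- pv_equiv track=rewrite | github.com/hpc-io/IOMiner | iominer/iominer_sweepline_analysis.py | CalMaxIO
-- ===== SOURCE A (Python) =====
-- def CalMaxIO(ds_rank_io):
--     max_rank_read = 0
--     max_rank_write = 0
--     max_rank_io = 0
--     max_r_rank = -1
--     max_w_rank = -1
--     max_io_rank = -1
--     tot_read = 0
--     tot_write = 0
--     tot_io = 0
--     for key,value in ds_rank_io.items():
--         if key == -1:
--             continue
--         tot_read += value[0]
--         tot_write += value[1]
--         tot_io += value[2]
--         if value[0] > max_rank_read:
--             max_rank_read = value[0]
--             max_r_rank = key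
--         if value[1] > max_rank_write:
--             max_rank_write = value[1]
--             max_w_rank = key
--         if value[2] > max_rank_io:
--             max_rank_io = value[2]
--             max_io_rank = key
--
--     return (max_rank_read,\
--             max_rank_write,\
--             max_rank_io,\
--             tot_read,\
--             tot_write,\
--             tot_io,\
--             max_r_rank,\
--             max_w_rank,\
--             max_io_rank)
-- ===== SOURCE B (Python) =====
-- def CalMaxIO(ds_rank_io):
--     items = [(k, v) for k, v in ds_rank_io.items() if k != -1]
--     tot_read = sum(v[0] for _, v in items)
--     tot_write = sum(v[1] for _, v in items)
--     tot_io = sum(v[2] for _, v in items)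
--
--     def max_scan(i):
--         best, rank = 0, -1
--         for k, v in items:
--             if v[i] > best:
--                 best, rank = v[i], k
--         return best, rank
--
--     mr, rr = max_scan(0)
--     mw, wr = max_scan(1)
--     mi, ir = max_scan(2)
--     return (mr, mw, mi, tot_read, tot_write, tot_io, rr, wr, ir)
-- ===== Notes on version B (the rewrite author's own statement) =====
-- stated objective: simpler
-- what changed: Replaces A's single loop carrying nine accumulators by a filtered item view, three sum() comprehensions for the totals, and a small index-parameterised scan helper for each maximum.
import Mathlib
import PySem

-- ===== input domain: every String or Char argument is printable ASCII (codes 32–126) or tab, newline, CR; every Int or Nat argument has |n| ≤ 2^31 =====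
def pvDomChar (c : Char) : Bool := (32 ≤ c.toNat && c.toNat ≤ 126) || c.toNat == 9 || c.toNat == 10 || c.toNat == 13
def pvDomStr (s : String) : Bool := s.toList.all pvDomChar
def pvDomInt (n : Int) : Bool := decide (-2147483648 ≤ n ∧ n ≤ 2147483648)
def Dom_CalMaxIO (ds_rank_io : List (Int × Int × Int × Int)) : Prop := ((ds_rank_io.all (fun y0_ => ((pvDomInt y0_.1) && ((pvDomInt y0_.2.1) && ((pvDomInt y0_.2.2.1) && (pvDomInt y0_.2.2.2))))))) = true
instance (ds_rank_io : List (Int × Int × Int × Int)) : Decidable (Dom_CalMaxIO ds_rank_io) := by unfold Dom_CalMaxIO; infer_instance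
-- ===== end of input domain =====

-- B replaces A's single nine-accumulator loop by a filtered item view, three sum comprehensions
-- and a per-metric max scan (objective: simpler decomposition).


-- ===== PORT A =====
-- state: (max_rank_read, max_rank_write, max_rank_io, tot_read, tot_write, tot_io, max_r_rank, max_w_rank, max_io_rank)
def CalMaxIOStep (s : Int × Int × Int × Int × Int × Int × Int × Int × Int)
    (kv : Int × Int × Int × Int) : Int × Int × Int × Int × Int × Int × Int × Int × Int :=
  match s, kv with
  | (mr, mw, mi, tr, tw, ti, rr, wr, ir), (k, v0, v1, v2) =>
    if k = -1 then (mr, mw, mi, tr, tw, ti, rr, wr, ir)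
    else
      let tr := tr + v0
      let tw := tw + v1
      let ti := ti + v2
      let p0 := if v0 > mr then (v0, k) else (mr, rr)
      let p1 := if v1 > mw then (v1, k) else (mw, wr)
      let p2 := if v2 > mi then (v2, k) else (mi, ir)
      (p0.1, p1.1, p2.1, tr, tw, ti, p0.2, p1.2, p2.2)

def CalMaxIO (ds_rank_io : List (Int × Int × Int × Int)) : Int × Int × Int × Int × Int × Int × Int × Int × Int :=
  ds_rank_io.foldl CalMaxIOStep (0, 0, 0, 0, 0, 0, -1, -1, -1)

-- ===== PORT B =====
-- one max scan, parameterised by the metric selector (Source B's max_scan(i))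
def CalMaxIOScan (sel : Int × Int × Int × Int → Int)
    (items : List (Int × Int × Int × Int)) : Int × Int :=
  items.foldl (fun p kv => if sel kv > p.1 then (sel kv, kv.1) else p) (0, -1)

def CalMaxIO_alt (ds_rank_io : List (Int × Int × Int × Int)) : Int × Int × Int × Int × Int × Int × Int × Int × Int :=
  let items := ds_rank_io.filter (fun kv => kv.1 ≠ -1)
  let tot_read := (items.map (fun kv => kv.2.1)).sum
  let tot_write := (items.map (fun kv => kv.2.2.1)).sum
  let tot_io := (items.map (fun kv => kv.2.2.2)).sum
  let p0 := CalMaxIOScan (fun kv => kv.2.1) items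
  let p1 := CalMaxIOScan (fun kv => kv.2.2.1) items
  let p2 := CalMaxIOScan (fun kv => kv.2.2.2) items
  (p0.1, p1.1, p2.1, tot_read, tot_write, tot_io, p0.2, p1.2, p2.2)

-- ===== PRECONDITION & SPEC =====
def Spec_CalMaxIO (ds_rank_io : List (Int × Int × Int × Int)) (out : Int × Int × Int × Int × Int × Int × Int × Int × Int) : Prop := out = CalMaxIO_alt ds_rank_io
instance (ds_rank_io : List (Int × Int × Int × Int)) (out : Int × Int × Int × Int × Int × Int × Int × Int × Int) : Decidable (Spec_CalMaxIO ds_rank_io out) := by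
  unfold Spec_CalMaxIO
  haveI dZ : DecidableEq Int := Int.instDecidableEq
  haveI d2 : DecidableEq (Int × Int) := @instDecidableEqProd _ _ dZ dZ
  haveI d3 : DecidableEq (Int × Int × Int) := @instDecidableEqProd _ _ dZ d2
  haveI d4 : DecidableEq (Int × Int × Int × Int) := @instDecidableEqProd _ _ dZ d3
  haveI d5 : DecidableEq (Int × Int × Int × Int × Int) := @instDecidableEqProd _ _ dZ d4
  haveI d6 : DecidableEq (Int × Int × Int × Int × Int × Int) := @instDecidableEqProd _ _ dZ d5
  haveI d7 : DecidableEq (Int × Int × Int × Int × Int × Int × Int) := @instDecidableEqProd _ _ dZ d6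
  haveI d8 : DecidableEq (Int × Int × Int × Int × Int × Int × Int × Int) := @instDecidableEqProd _ _ dZ d7
  exact @instDecidableEqProd _ _ dZ d8 out (CalMaxIO_alt ds_rank_io)

-- ===== CLAIM (what is proved, stated in full; the proofs are below) =====
def Claim_equal_CalMaxIO : Prop := ∀ (ds_rank_io : List (Int × Int × Int × Int)), Dom_CalMaxIO ds_rank_io → Spec_CalMaxIO ds_rank_io (CalMaxIO ds_rank_io)

-- ===== LEMMAS AND PROOFS =====

-- A's fold, started from an arbitrary state, equals B's separate passes started from the
-- matching components.
theorem calMaxIO_fold_split (l : List (Int × Int × Int × Int))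
    (mr mw mi tr tw ti rr wr ir : Int) :
    l.foldl CalMaxIOStep (mr, mw, mi, tr, tw, ti, rr, wr, ir) =
      (let items := l.filter (fun kv => kv.1 ≠ -1)
       let p0 := items.foldl (fun p kv => if kv.2.1 > p.1 then (kv.2.1, kv.1) else p) (mr, rr)
       let p1 := items.foldl (fun p kv => if kv.2.2.1 > p.1 then (kv.2.2.1, kv.1) else p) (mw, wr)
       let p2 := items.foldl (fun p kv => if kv.2.2.2 > p.1 then (kv.2.2.2, kv.1) else p) (mi, ir)
       (p0.1, p1.1, p2.1,
        tr + (items.map (fun kv => kv.2.1)).sum,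
        tw + (items.map (fun kv => kv.2.2.1)).sum,
        ti + (items.map (fun kv => kv.2.2.2)).sum,
        p0.2, p1.2, p2.2)) := by
  induction l generalizing mr mw mi tr tw ti rr wr ir with
  | nil => simp
  | cons hd tl ih =>
    obtain ⟨k, v0, v1, v2⟩ := hd
    by_cases hk : k = -1
    · subst hk
      simp [CalMaxIOStep, List.filter_cons, ih]
    · simp only [List.foldl_cons, CalMaxIOStep, if_neg hk, List.filter_cons,
        decide_eq_true_eq, hk, if_pos, ne_eq, not_false_iff]
      rw [ih]
      simp [List.foldl_cons, List.map_cons, List.sum_cons]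
      constructor
      · ring
      constructor
      · ring
      · ring

-- ===== VERDICT (by name: the statement is the Claim_ definition above) =====
theorem CalMaxIO_spec : Claim_equal_CalMaxIO := by
  intro l _
  show CalMaxIO l = CalMaxIO_alt l
  unfold CalMaxIO CalMaxIO_alt CalMaxIOScan
  rw [calMaxIO_fold_split]
  simp
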